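-- pv_equiv track=rewrite | github.com/UrjaSahni/ai-research-paper-summarizer | streamlit_app.py | compare_papers
-- ===== SOURCE A (Python) =====
-- def compare_papers(summaries_dict):
--     if len(summaries_dict) < 2:
--         return None
--
--     comparison = {
--         "agreements": [],
--         "contradictions": [],
--         "gaps": []
--     }
--
--     paper_names = list(summaries_dict.keys())
--
--     # Simple keyword-based comparison
--     for i in range(len(paper_names)):
--         for j in range(i+1, len(paper_names)):
--             paper1 = paper_names[i]
--             paper2 = paper_names[j]
--
--             summary1 = summaries_dict[paper1].get('executive', '')
--             summary2 = summaries_dict[paper2].get('executive', '')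
--
--             # Find common themes
--             words1 = set(summary1.lower().split())
--             words2 = set(summary2.lower().split())
--             common = words1.intersection(words2)
--
--             if len(common) > 10:
--                 comparison['agreements'].append(f"{paper1} and {paper2} discuss similar concepts")
--
--     # Identify unique contributions
--     all_topics = set()
--     for paper, summaries in summaries_dict.items():
--         exec_summary = summaries.get('executive', '')
--         topics = set(exec_summary.lower().split())
--
--         unique = topics - all_topics
--         if len(unique) > 5:
--             comparison['gaps'].append(f"{paper} introduces unique aspects not covered by others")
--
--         all_topics.update(topics)
--
--     return comparison
-- ===== SOURCE B (Python) =====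
-- def _pairs(ps):
--     # all (x, y) with x before y in ps
--     out = []
--     for a, x in enumerate(ps):
--         for y in ps[a + 1:]:
--             out.append((x, y))
--     return out
--
--
-- def compare_papers(summaries_dict):
--     if len(summaries_dict) < 2:
--         return None
--
--     names = list(summaries_dict.keys())
--     word_sets = [set(summaries_dict[n].get('executive', '').lower().split())
--                  for n in names]
--
--     # Inverted index: word -> ascending list of paper indices containing it.
--     index = {}
--     for i, ws in enumerate(word_sets):
--         for w in ws:
--             index[w] = index.get(w, []) + [i]
--
--     # Shared-word counter per (i, j) pair, accumulated word by word.
--     counts = {}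
--     for w, postings in index.items():
--         for p in _pairs(postings):
--             counts[p] = counts.get(p, 0) + 1
--
--     agreements = []
--     for i in range(len(names)):
--         for j in range(i + 1, len(names)):
--             if counts.get((i, j), 0) > 10:
--                 agreements.append(f"{names[i]} and {names[j]} discuss similar concepts")
--
--     gaps = []
--     seen = set()
--     for name, ws in zip(names, word_sets):
--         if len(ws - seen) > 5:
--             gaps.append(f"{name} introduces unique aspects not covered by others")
--         seen |= ws
--
--     return {"agreements": agreements, "contradictions": [], "gaps": gaps}
-- ===== Notes on version B (the rewrite author's own statement) =====
-- stated objective: faster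
-- what changed: Replaces the per-pair set-intersection scan (which re-lowercases and re-splits both summaries for every pair) with lowercase word-sets computed once and an inverted index (word -> posting list of paper indices) feeding a dict counter keyed by (i,j) that accumulates the shared-word count word by word; the gaps pass reuses the precomputed sets.
import Mathlib
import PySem

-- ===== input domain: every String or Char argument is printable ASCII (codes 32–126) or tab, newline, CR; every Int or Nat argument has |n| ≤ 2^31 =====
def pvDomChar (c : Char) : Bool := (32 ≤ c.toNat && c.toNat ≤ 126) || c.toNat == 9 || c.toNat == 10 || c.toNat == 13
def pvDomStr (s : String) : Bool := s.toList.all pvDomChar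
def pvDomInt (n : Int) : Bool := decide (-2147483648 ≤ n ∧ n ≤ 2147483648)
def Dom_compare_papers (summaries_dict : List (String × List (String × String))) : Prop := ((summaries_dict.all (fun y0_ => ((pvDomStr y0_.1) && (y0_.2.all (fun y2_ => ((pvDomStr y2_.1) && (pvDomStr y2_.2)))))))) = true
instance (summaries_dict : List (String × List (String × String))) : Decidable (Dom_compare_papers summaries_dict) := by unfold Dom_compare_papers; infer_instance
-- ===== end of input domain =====

-- B replaces the per-pair set-intersection scan by an inverted index (word → posting list of
-- paper indices) feeding a dict counter keyed by (i, j); same return value, different algorithm.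

-- ===== PORT A =====
-- summaries_dict[paper].get('executive', '') is rendered with Dict.getD; the outer lookup
-- summaries_dict[paper1] uses getD with default [] — paper1 is always a key, so no KeyError arises.
def compare_papers (summaries_dict : List (String × List (String × String))) : Option (List (String × List String)) :=
  let sd := PySem.Dict.ofList summaries_dict
  if sd.size < 2 then none
  else
    let paper_names := sd.keys
    -- for i in range(len(paper_names)): for j in range(i+1, len(paper_names)): …
    let agreements := (PySem.List.pyRange 0 (paper_names.length : Int)).foldl (fun acc i =>
      (PySem.List.pyRange (i + 1) (paper_names.length : Int)).foldl (fun acc j =>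
        if 10 < PySem.Set.len (PySem.Set.inter
            (PySem.Set.ofList (PySem.Str.split₀ (PySem.Str.lower
              ((PySem.Dict.ofList (sd.getD (PySem.List.pyGetD paper_names i "") [])).getD "executive" ""))))
            (PySem.Set.ofList (PySem.Str.split₀ (PySem.Str.lower
              ((PySem.Dict.ofList (sd.getD (PySem.List.pyGetD paper_names j "") [])).getD "executive" ""))))) then
          acc ++ [PySem.List.pyGetD paper_names i "" ++ " and " ++ PySem.List.pyGetD paper_names j "" ++ " discuss similar concepts"]
        else acc) acc) ([] : List String)
    -- for paper, summaries in summaries_dict.items(): …  (state = (gaps, all_topics))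
    let res := sd.items.foldl (fun (st : List String × PySem.Set String) pr =>
        (if 5 < PySem.Set.len (PySem.Set.diff
            (PySem.Set.ofList (PySem.Str.split₀ (PySem.Str.lower ((PySem.Dict.ofList pr.2).getD "executive" "")))) st.2) then
          st.1 ++ [pr.1 ++ " introduces unique aspects not covered by others"]
        else st.1,
        PySem.Set.update st.2 (PySem.Set.ofList (PySem.Str.split₀ (PySem.Str.lower ((PySem.Dict.ofList pr.2).getD "executive" ""))))))
      (([] : List String), (PySem.Set.empty : PySem.Set String))
    some [("agreements", agreements), ("contradictions", []), ("gaps", res.1)]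

-- ===== PORT B =====
-- _pairs(ps): all (x, y) with x strictly before y in ps
def pvPairs : List Int → List (Int × Int)
  | [] => []
  | x :: xs => xs.map (fun y => (x, y)) ++ pvPairs xs

def compare_papers_alt (summaries_dict : List (String × List (String × String))) : Option (List (String × List String)) :=
  let sd := PySem.Dict.ofList summaries_dict
  if sd.size < 2 then none
  else
    let names := sd.keys
    let word_sets := names.map (fun nm =>
      PySem.Set.ofList (PySem.Str.split₀ (PySem.Str.lower
        ((PySem.Dict.ofList (sd.getD nm [])).getD "executive" ""))))
    -- inverted index: word -> ascending list of paper indices containing it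
    let index := (PySem.List.enumerate word_sets).foldl (fun idx p =>
        p.2.foldl (fun idx w => idx.modify w [] (fun l => l ++ [p.1])) idx)
      (PySem.Dict.empty : PySem.Dict String (List Int))
    -- shared-word counter per (i, j) pair, accumulated word by word
    let counts := index.items.foldl (fun c pr =>
        (pvPairs pr.2).foldl (fun c q => c.modify q 0 (fun v => v + 1)) c)
      (PySem.Dict.empty : PySem.Dict (Int × Int) Int)
    let agreements := (PySem.List.pyRange 0 (names.length : Int)).foldl (fun acc i =>
      (PySem.List.pyRange (i + 1) (names.length : Int)).foldl (fun acc j =>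
        if 10 < counts.getD (i, j) 0 then
          acc ++ [PySem.List.pyGetD names i "" ++ " and " ++ PySem.List.pyGetD names j "" ++ " discuss similar concepts"]
        else acc) acc) ([] : List String)
    let res := (names.zip word_sets).foldl (fun (st : List String × PySem.Set String) pr =>
        (if 5 < PySem.Set.len (PySem.Set.diff pr.2 st.2) then
          st.1 ++ [pr.1 ++ " introduces unique aspects not covered by others"]
        else st.1,
        PySem.Set.update st.2 pr.2))
      (([] : List String), (PySem.Set.empty : PySem.Set String))
    some [("agreements", agreements), ("contradictions", []), ("gaps", res.1)]

-- ===== PRECONDITION & SPEC =====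
def Spec_compare_papers (summaries_dict : List (String × List (String × String))) (out : Option (List (String × List String))) : Prop := out = compare_papers_alt summaries_dict
instance (summaries_dict : List (String × List (String × String))) (out : Option (List (String × List String))) : Decidable (Spec_compare_papers summaries_dict out) := by unfold Spec_compare_papers; infer_instance

-- ===== CLAIM (what is proved, stated in full; the proofs are below) =====
def Claim_equal_compare_papers : Prop := ∀ (summaries_dict : List (String × List (String × String))), Dom_compare_papers summaries_dict → Spec_compare_papers summaries_dict (compare_papers summaries_dict)

-- ===== LEMMAS AND PROOFS =====

-- the index-building fold of port B, start index and start dict generalised for the induction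
def pvIdxFrom (k : Int) (sets : List (PySem.Set String)) (d : PySem.Dict String (List Int)) :
    PySem.Dict String (List Int) :=
  (PySem.List.enumerate sets k).foldl (fun idx p =>
    p.2.foldl (fun idx w => idx.modify w [] (fun l => l ++ [p.1])) idx) d

-- the pair-counting fold of port B
def pvCountsOf (sets : List (PySem.Set String)) : PySem.Dict (Int × Int) Int :=
  (pvIdxFrom 0 sets PySem.Dict.empty).items.foldl (fun c pr =>
    (pvPairs pr.2).foldl (fun c q => c.modify q 0 (fun v => v + 1)) c) PySem.Dict.empty

-- the posting list of word v over papers enumerated from k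
def pvPost (k : Int) (sets : List (PySem.Set String)) (v : String) : List Int :=
  ((PySem.List.enumerate sets k).filter (fun q => decide (v ∈ q.2))).map (·.1)

lemma pvInner_getD (ws : List String) (i : Int) (d : PySem.Dict String (List Int)) (v : String) :
    (ws.foldl (fun idx w => idx.modify w [] (fun l => l ++ [i])) d).getD v []
      = d.getD v [] ++ List.replicate (ws.count v) i := by
  induction ws generalizing d with
  | nil => simp
  | cons w ws ih =>
    rw [List.foldl_cons, ih, PySem.Dict.getD_modify, List.count_cons]
    by_cases h : v = w
    · subst h
      simp [List.replicate_succ]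
    · have h' : (w == v) = false := by simpa using fun hh => h hh.symm
      simp [h, h']

lemma pvIdxFrom_getD (sets : List (PySem.Set String)) (k : Int)
    (d : PySem.Dict String (List Int)) (v : String) (hnd : ∀ s ∈ sets, List.Nodup s) :
    (pvIdxFrom k sets d).getD v [] = d.getD v [] ++ pvPost k sets v := by
  induction sets generalizing k d with
  | nil => simp [pvIdxFrom, pvPost, PySem.List.enumerate_nil]
  | cons s rest ih =>
    have hs : List.Nodup s := hnd s (by simp)
    have hrest : ∀ t ∈ rest, List.Nodup t := fun t ht => hnd t (by simp [ht])
    have h2 := ih (k + 1) (s.foldl (fun idx w => idx.modify w [] (fun l => l ++ [k])) d) hrest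
    simp only [pvIdxFrom, pvPost, PySem.List.enumerate_cons, List.foldl_cons, List.filter_cons] at *
    rw [h2, pvInner_getD s k d v, List.Nodup.count hs]
    by_cases hv : v ∈ s
    · simp [hv, List.replicate_succ]
    · simp [hv]

lemma pvIdxFrom_nodup_keys (sets : List (PySem.Set String)) (k : Int)
    (d : PySem.Dict String (List Int)) (h : d.keys.Nodup) : (pvIdxFrom k sets d).keys.Nodup := by
  induction sets generalizing k d with
  | nil => simpa [pvIdxFrom, PySem.List.enumerate_nil] using h
  | cons s rest ih =>
    simp only [pvIdxFrom, PySem.List.enumerate_cons, List.foldl_cons] at *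
    exact ih (k + 1) _ (PySem.Dict.nodup_keys_foldl_modify_key s (fun w => w) []
      (fun _ _ => fun l => l ++ [k]) d h)

lemma pvPost_pairwise (sets : List (PySem.Set String)) (v : String) :
    (pvPost 0 sets v).Pairwise (· < ·) := by
  have h0 : ((PySem.List.enumerate sets 0).map (·.1)).Pairwise (· < ·) := by
    rw [PySem.List.map_fst_enumerate]
    exact PySem.List.pairwise_lt_pyRange_one 0 (0 + (sets.length : Int))
  have h1 : (PySem.List.enumerate sets 0).Pairwise (fun p q => p.1 < q.1) :=
    (List.pairwise_map).mp h0
  exact (List.pairwise_map).mpr (h1.filter _)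

lemma pvMem_enumerate {α : Type} (xs : List α) (s : Int) (q : Int × α) :
    q ∈ PySem.List.enumerate xs s ↔ ∃ k : Nat, ∃ hk : k < xs.length, q = (s + (k : Int), xs[k]) := by
  rw [List.mem_iff_getElem]
  constructor
  · rintro ⟨k, hk, hq⟩
    have hk' : k < xs.length := by simpa [PySem.List.length_enumerate] using hk
    refine ⟨k, hk', ?_⟩
    rw [← hq, PySem.List.getElem_enumerate]
  · rintro ⟨k, hk, rfl⟩
    refine ⟨k, by simpa [PySem.List.length_enumerate] using hk, ?_⟩
    rw [PySem.List.getElem_enumerate]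

lemma pvMem_post (sets : List (PySem.Set String)) (v : String) (i : Int) (hi : 0 ≤ i)
    (hlen : i < (sets.length : Int)) :
    i ∈ pvPost 0 sets v ↔ v ∈ sets[i.toNat]'(by omega) := by
  unfold pvPost
  rw [List.mem_map]
  constructor
  · rintro ⟨q, hq, rfl⟩
    rw [List.mem_filter] at hq
    obtain ⟨hqm, hqv⟩ := hq
    obtain ⟨k, hk, rfl⟩ := (pvMem_enumerate sets 0 q).mp hqm
    simpa using hqv
  · intro hv
    refine ⟨(i, sets[i.toNat]'(by omega)), ?_, rfl⟩
    rw [List.mem_filter]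
    refine ⟨(pvMem_enumerate sets 0 _).mpr ⟨i.toNat, by omega, ?_⟩, by simpa using hv⟩
    rw [Prod.ext_iff]
    exact ⟨by simp; omega, rfl⟩

lemma pvCount_map_pair (x i j : Int) (xs : List Int) :
    ((xs.map (fun y => (x, y))).count (i, j)) = if x = i then xs.count j else 0 := by
  induction xs with
  | nil => simp
  | cons y ys ih =>
    simp only [List.map_cons, List.count_cons, ih]
    by_cases hx : x = i
    · subst hx
      by_cases hy : y = j
      · simp [hy]
      · simp [hy, Prod.ext_iff]
    · simp [hx, Prod.ext_iff]

lemma pvPairs_count (ps : List Int) (hps : ps.Pairwise (· < ·)) (i j : Int) (hij : i < j) :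
    (pvPairs ps).count (i, j) = if i ∈ ps ∧ j ∈ ps then 1 else 0 := by
  induction ps with
  | nil => simp [pvPairs]
  | cons x xs ih =>
    have hlt : ∀ y ∈ xs, x < y := fun y hy => (List.pairwise_cons.mp hps).1 y hy
    have htail : xs.Pairwise (· < ·) := (List.pairwise_cons.mp hps).2
    simp only [pvPairs, List.count_append, pvCount_map_pair, ih htail]
    by_cases hx : x = i
    · subst hx
      have hnx : x ∉ xs := fun hmem => lt_irrefl x (hlt x hmem)
      have hxs : xs.Nodup := htail.imp (fun h => ne_of_lt h)
      have hjx : j ≠ x := by omega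
      rw [List.Nodup.count hxs]
      simp [hnx, hjx, List.mem_cons]
    · by_cases hi : i ∈ xs
      · have hjx : j ≠ x := by have := hlt i hi; omega
        have hix : i ≠ x := fun hh => hx hh.symm
        simp [hx, hi, hjx, hix, List.mem_cons]
      · have hix : i ≠ x := fun hh => hx hh.symm
        simp [hx, hi, hix, List.mem_cons]

lemma pvSum_ind {α : Type} (p : α → Bool) (l : List α) :
    (l.map (fun x => if p x then 1 else 0)).sum = l.countP p := by
  induction l with
  | nil => simp
  | cons x xs ih =>
    simp only [List.map_cons, List.sum_cons, List.countP_cons, ih]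
    by_cases hp : p x = true <;> simp [hp, Nat.add_comm]

lemma pvCountP_subset {α : Type} [DecidableEq α] (l A : List α) (p : α → Bool)
    (hl : l.Nodup) (hA : A.Nodup) (hsub : ∀ x ∈ A, x ∈ l) :
    l.countP (fun x => decide (x ∈ A) && p x) = A.countP p := by
  rw [List.countP_eq_length_filter, List.countP_eq_length_filter]
  apply List.Perm.length_eq
  rw [List.perm_ext_iff_of_nodup (hl.filter _) (hA.filter _)]
  intro a
  simp only [List.mem_filter, Bool.and_eq_true, decide_eq_true_eq]
  constructor
  · rintro ⟨_, ha, hp⟩; exact ⟨ha, hp⟩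
  · rintro ⟨ha, hp⟩; exact ⟨hsub a ha, ha, hp⟩

lemma pvCounts_getD (sets : List (PySem.Set String)) (hnd : ∀ s ∈ sets, List.Nodup s)
    (i j : Int) (hi : 0 ≤ i) (hij : i < j) (hj : j < (sets.length : Int)) :
    (pvCountsOf sets).getD (i, j) 0
      = (((sets[i.toNat]'(by omega)).filter (fun w => (sets[j.toNat]'(by omega)).contains w)).length : Int) := by
  have hkeys : (pvIdxFrom 0 sets PySem.Dict.empty).keys.Nodup :=
    pvIdxFrom_nodup_keys sets 0 PySem.Dict.empty PySem.Dict.nodup_keys_empty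
  have hpost : ∀ w, (pvIdxFrom 0 sets PySem.Dict.empty).getD w [] = pvPost 0 sets w := by
    intro w
    rw [pvIdxFrom_getD sets 0 PySem.Dict.empty w hnd, PySem.Dict.getD_empty]
    simp
  have hSi : ∀ w ∈ sets[i.toNat]'(by omega), w ∈ (pvIdxFrom 0 sets PySem.Dict.empty).keys := by
    intro w hw
    by_contra hmem
    have h0 : (pvIdxFrom 0 sets PySem.Dict.empty).get? w = none :=
      (PySem.Dict.get?_eq_none_iff_not_mem_keys _ w).mpr hmem
    have h1 : (pvIdxFrom 0 sets PySem.Dict.empty).getD w [] = [] := by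
      simp [PySem.Dict.getD, h0]
    have h2 : i ∈ pvPost 0 sets w := (pvMem_post sets w i hi (by omega)).mpr hw
    rw [hpost w] at h1
    rw [h1] at h2
    simp at h2
  unfold pvCountsOf
  rw [← List.foldl_flatMap]
  rw [PySem.Dict.getD_foldl_modify_add_one]
  rw [PySem.Dict.getD_empty]
  rw [List.count_flatMap]
  rw [PySem.Dict.items_eq_map_keys _ hkeys ([] : List Int)]
  rw [List.map_map]
  have hbody : ∀ w ∈ (pvIdxFrom 0 sets PySem.Dict.empty).keys,
      ((List.count ((i, j)) ∘ fun pr : String × List Int => pvPairs pr.2) ∘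
          fun k => (k, (pvIdxFrom 0 sets PySem.Dict.empty).getD k [])) w
        = (fun w => if (decide (w ∈ sets[i.toNat]'(by omega)) &&
            ((sets[j.toNat]'(by omega)).contains w)) then 1 else 0) w := by
    intro w _
    simp only [Function.comp]
    rw [hpost w, pvPairs_count _ (pvPost_pairwise sets w) i j hij]
    by_cases h1 : w ∈ sets[i.toNat]'(by omega) <;>
      by_cases h2 : w ∈ sets[j.toNat]'(by omega) <;>
        simp [h1, h2, List.contains_eq_mem,
          pvMem_post sets w i hi (by omega : i < (sets.length : Int)),
          pvMem_post sets w j (by omega : (0:Int) ≤ j) hj]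
  rw [List.map_congr_left hbody]
  rw [pvSum_ind]
  rw [pvCountP_subset _ _ _ hkeys (hnd _ (List.getElem_mem _)) hSi]
  rw [List.countP_eq_length_filter]
  have hfil : List.filter (fun w => (sets[j.toNat]'(by omega)).contains w) (sets[i.toNat]'(by omega))
      = List.filter (fun w => decide (w ∈ sets[j.toNat]'(by omega))) (sets[i.toNat]'(by omega)) :=
    List.filter_congr (fun w _ => List.contains_eq_mem w _)
  simp [hfil]

lemma pvAgree (names : List String) (f : String → PySem.Set String)
    (hf : ∀ nm, (f nm).Nodup) :
    ((PySem.List.pyRange 0 (names.length : Int)).foldl (fun acc i =>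
      (PySem.List.pyRange (i + 1) (names.length : Int)).foldl (fun acc j =>
        if 10 < PySem.Set.len (PySem.Set.inter (f (PySem.List.pyGetD names i ""))
            (f (PySem.List.pyGetD names j ""))) then
          acc ++ [PySem.List.pyGetD names i "" ++ " and " ++ PySem.List.pyGetD names j "" ++ " discuss similar concepts"]
        else acc) acc) ([] : List String))
    = ((PySem.List.pyRange 0 (names.length : Int)).foldl (fun acc i =>
      (PySem.List.pyRange (i + 1) (names.length : Int)).foldl (fun acc j =>
        if 10 < (pvCountsOf (names.map f)).getD (i, j) 0 then
          acc ++ [PySem.List.pyGetD names i "" ++ " and " ++ PySem.List.pyGetD names j "" ++ " discuss similar concepts"]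
        else acc) acc) ([] : List String)) := by
  apply PySem.List.foldl_congr_mem
  intro acc i hi
  obtain ⟨hi0, hi1⟩ := PySem.List.mem_pyRange_one.mp hi
  apply PySem.List.foldl_congr_mem
  intro acc2 j hj
  obtain ⟨hj0, hj1⟩ := PySem.List.mem_pyRange_one.mp hj
  have hnd : ∀ s ∈ names.map f, List.Nodup s := by
    intro s hs
    obtain ⟨nm, _, rfl⟩ := List.mem_map.mp hs
    exact hf nm
  have hjlen : j < ((names.map f).length : Int) := by simpa using hj1
  have hcond : PySem.Set.len (PySem.Set.inter (f (PySem.List.pyGetD names i ""))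
      (f (PySem.List.pyGetD names j ""))) = (pvCountsOf (names.map f)).getD (i, j) 0 := by
    rw [pvCounts_getD (names.map f) hnd i j hi0 (by omega) hjlen]
    rw [PySem.List.pyGetD_eq_getElem names "" hi0 hi1,
        PySem.List.pyGetD_eq_getElem names "" (by omega) hj1]
    simp [PySem.Set.inter, PySem.Set.len, List.getElem_map]
  rw [hcond]

lemma pvZipMapSelf {α β : Type} (l : List α) (g : α → β) :
    l.zip (l.map g) = l.map (fun a => (a, g a)) := by
  induction l with
  | nil => simp
  | cons x xs ih => simp [ih]

lemma pvGaps (sd : PySem.Dict String (List (String × String))) (hnd : sd.keys.Nodup) :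
    (sd.items.foldl (fun (st : List String × PySem.Set String) pr =>
        (if 5 < PySem.Set.len (PySem.Set.diff
            (PySem.Set.ofList (PySem.Str.split₀ (PySem.Str.lower ((PySem.Dict.ofList pr.2).getD "executive" "")))) st.2) then
          st.1 ++ [pr.1 ++ " introduces unique aspects not covered by others"]
        else st.1,
        PySem.Set.update st.2 (PySem.Set.ofList (PySem.Str.split₀ (PySem.Str.lower ((PySem.Dict.ofList pr.2).getD "executive" ""))))))
      (([] : List String), (PySem.Set.empty : PySem.Set String)))
    = ((sd.keys.zip (sd.keys.map (fun nm =>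
        PySem.Set.ofList (PySem.Str.split₀ (PySem.Str.lower
          ((PySem.Dict.ofList (sd.getD nm [])).getD "executive" "")))))).foldl
        (fun (st : List String × PySem.Set String) pr =>
          (if 5 < PySem.Set.len (PySem.Set.diff pr.2 st.2) then
            st.1 ++ [pr.1 ++ " introduces unique aspects not covered by others"]
          else st.1,
          PySem.Set.update st.2 pr.2))
        (([] : List String), (PySem.Set.empty : PySem.Set String))) := by
  rw [PySem.Dict.items_eq_map_keys sd hnd ([] : List (String × String))]
  rw [pvZipMapSelf]
  rw [List.foldl_map, List.foldl_map]

-- ===== VERDICT (by name: the statement is the Claim_ definition above) =====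
theorem compare_papers_spec : Claim_equal_compare_papers := by
  intro d _
  unfold Spec_compare_papers
  show compare_papers d = compare_papers_alt d
  simp only [compare_papers, compare_papers_alt]
  by_cases h : (PySem.Dict.ofList d).size < 2
  · simp only [if_pos h]
  · simp only [if_neg h]
    refine congrArg some ?_
    have hag := pvAgree (PySem.Dict.ofList d).keys
      (fun nm => PySem.Set.ofList (PySem.Str.split₀ (PySem.Str.lower
        ((PySem.Dict.ofList ((PySem.Dict.ofList d).getD nm [])).getD "executive" ""))))
      (fun nm => PySem.Set.nodup_ofList _)
    have hgp := pvGaps (PySem.Dict.ofList d) (PySem.Dict.nodup_keys_ofList d)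
    refine congrArg₂ List.cons (congrArg (Prod.mk "agreements") hag) ?_
    refine congrArg₂ List.cons rfl ?_
    exact congrArg₂ List.cons (congrArg (Prod.mk "gaps") (congrArg Prod.fst hgp)) rfl
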